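-- pv_equiv track=rewrite | github.com/Nikitaion/lessons | master/white_walkers.py | string_split_numbers
-- ===== SOURCE A (Python) =====
-- def string_split_numbers(s):
--     # разбить строку по подстрокам -
--     # должны начинаться и заканчиваться цифрой
--     # https://drakonhub.com/ide/doc/forall/133
--
--     l1d_ = []
--     left = 0
--
--     for i in range(len(s)):
--         if s[i].isdigit():
--             if left:
--                 subs = s[left:i + 1]
--                 l1d_.append(subs)
--             left = i
--
--     return l1d_
-- ===== SOURCE B (Python) =====
-- def string_split_numbers(s):
--     # collect digit positions, then slice between consecutive digits
--     idx = [i for i, c in enumerate(s) if c.isdigit()]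
--     return [s[a:b + 1] for a, b in zip(idx, idx[1:])]
-- ===== Notes on version B (the rewrite author's own statement) =====
-- stated objective: simpler
-- what changed: B first collects all digit positions with enumerate, then builds the slices by zipping consecutive positions, replacing A's single stateful loop with a sentinel 'left' index; B also drops A's falsy-index guard so the slice starting at position 0 is kept.
-- intended difference: On strings whose first character is a digit and that contain at least two digits, A's 'if left:' guard (0 is falsy) silently drops the first slice (e.g. A('1a2b3') = ['2b3']); B returns it (['1a2','2b3']), which is the intended 'substring between every pair of consecutive digits'. — e.g. on string_split_numbers("12"): A returns [], B returns ["12"]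
import Mathlib
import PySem

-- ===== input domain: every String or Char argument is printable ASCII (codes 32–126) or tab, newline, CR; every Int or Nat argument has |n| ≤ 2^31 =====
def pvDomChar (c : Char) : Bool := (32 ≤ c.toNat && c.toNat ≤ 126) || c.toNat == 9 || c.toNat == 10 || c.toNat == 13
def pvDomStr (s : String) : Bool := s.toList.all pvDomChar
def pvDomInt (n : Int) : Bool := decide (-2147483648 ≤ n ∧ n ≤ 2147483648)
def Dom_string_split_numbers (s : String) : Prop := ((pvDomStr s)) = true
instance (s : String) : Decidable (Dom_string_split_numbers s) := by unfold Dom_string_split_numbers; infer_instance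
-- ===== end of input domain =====

-- B collects the digit positions first and zips consecutive positions into slices (simpler than A's
-- stateful loop); A's falsy 'if left:' guard drops the slice starting at index 0, B keeps it (see D_).

-- ===== PORT A =====
def string_split_numbers (s : String) : List String :=
  ((PySem.List.pyRange 0 (PySem.Str.len s) 1).foldl
    (fun (st : List String × Int) (i : Int) =>
      match PySem.Str.pyGet? s i with    -- i ranges over range(len(s)), so never none
      | some c =>
        if PySem.Chars.isdigit c then
          ((if st.2 ≠ 0 then st.1 ++ [PySem.Str.slice s (some st.2) (some (i + 1))] else st.1), i)
        else st
      | none => st)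
    ([], 0)).1

-- ===== PORT B =====
def string_split_numbers_alt (s : String) : List String :=
  let idx : List Int :=
    ((PySem.List.enumerate s.toList 0).filter (fun p => PySem.Chars.isdigit p.2)).map (fun p => p.1)
  (idx.zip (PySem.List.slice idx (some 1) none)).map
    (fun p => PySem.Str.slice s (some p.1) (some (p.2 + 1)))

-- ===== PRECONDITION & SPEC =====
-- On strings whose first character is a digit and that contain at least two digits, A's 'if left:'
-- guard (0 is falsy) silently drops the first slice; B returns it, the intended value.
def D_string_split_numbers (s : String) : Prop :=
  s.toList.head?.any PySem.Chars.isdigit = true ∧ 2 ≤ s.toList.countP PySem.Chars.isdigit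
instance (s : String) : Decidable (D_string_split_numbers s) := by
  unfold D_string_split_numbers; infer_instance
def Spec_string_split_numbers (s : String) (out : List String) : Prop :=
  ¬ D_string_split_numbers s → out = string_split_numbers_alt s
instance (s : String) (out : List String) : Decidable (Spec_string_split_numbers s out) := by
  unfold Spec_string_split_numbers; infer_instance
def pvDiffWitness_string_split_numbers : String := "12"
def pvDiffWitnessOut_string_split_numbers : (List String) × (List String) := ([], ["12"])

-- ===== CLAIM (what is proved, stated in full; the proofs are below) =====
def Claim_unchanged_string_split_numbers : Prop := ∀ (s : String), Dom_string_split_numbers s → Spec_string_split_numbers s (string_split_numbers s)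
def Claim_changed_string_split_numbers : Prop := Dom_string_split_numbers (pvDiffWitness_string_split_numbers) ∧ D_string_split_numbers (pvDiffWitness_string_split_numbers) ∧ string_split_numbers (pvDiffWitness_string_split_numbers) = pvDiffWitnessOut_string_split_numbers.1 ∧ string_split_numbers_alt (pvDiffWitness_string_split_numbers) = pvDiffWitnessOut_string_split_numbers.2 ∧ pvDiffWitnessOut_string_split_numbers.1 ≠ pvDiffWitnessOut_string_split_numbers.2
def Claim_exact_string_split_numbers : Prop := ∀ (s : String), Dom_string_split_numbers s → D_string_split_numbers s → string_split_numbers s ≠ string_split_numbers_alt s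

-- ===== LEMMAS AND PROOFS =====

-- digit positions of an enumerated character list (B's `idx`)
def pvDpos (ps : List (Int × Char)) : List Int :=
  (ps.filter (fun p => PySem.Chars.isdigit p.2)).map (fun p => p.1)

-- A's loop, result-only, as a recursion on the digit-position list
def pvGp (s : String) : Int → List Int → List String
  | _, [] => []
  | left, i :: rest =>
      (if left ≠ 0 then [PySem.Str.slice s (some left) (some (i + 1))] else []) ++ pvGp s i rest

-- B's comprehension on a position list
def pvZm (s : String) (l : List Int) : List String :=
  (l.zip l.tail).map (fun p => PySem.Str.slice s (some p.1) (some (p.2 + 1)))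

theorem pvGp_zm (s : String) :
    ∀ (rest : List Int) (left : Int), left ≠ 0 → (∀ i ∈ rest, i ≠ 0) →
      pvGp s left rest = pvZm s (left :: rest) := by
  intro rest
  induction rest with
  | nil => intro left h _; simp [pvGp, pvZm]
  | cons i r ih =>
      intro left h hall
      have hi : i ≠ 0 := hall i (by simp)
      have hr := ih i hi (fun j hj => hall j (by simp [hj]))
      simp only [pvGp, pvZm, List.tail_cons, List.zip_cons_cons, List.map_cons, if_pos h] at *
      simp [hr]

theorem pvFold_gp (s : String) :
    ∀ (ps : List (Int × Char)) (acc : List String) (left : Int),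
      (ps.foldl
        (fun (st : List String × Int) (p : Int × Char) =>
          if PySem.Chars.isdigit p.2 then
            ((if st.2 ≠ 0 then st.1 ++ [PySem.Str.slice s (some st.2) (some (p.1 + 1))] else st.1), p.1)
          else st)
        (acc, left)).1 = acc ++ pvGp s left (pvDpos ps) := by
  intro ps
  induction ps with
  | nil => intro acc left; simp [pvDpos, pvGp]
  | cons p t ih =>
      intro acc left
      rw [List.foldl_cons]
      by_cases hd : PySem.Chars.isdigit p.2
      · rw [if_pos hd, ih]
        by_cases hl : left = 0
        · subst hl; simp [pvDpos, hd, pvGp]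
        · simp [pvDpos, hd, pvGp, hl]
      · rw [if_neg hd, ih]
        simp [pvDpos, hd]

-- A computed as pvGp over the digit positions
theorem pvA_eq (s : String) :
    string_split_numbers s = pvGp s 0 (pvDpos (PySem.List.enumerate s.toList 0)) := by
  have h := pvFold_gp s (PySem.List.enumerate s.toList 0) [] 0
  rw [List.nil_append] at h
  rw [← h]
  unfold string_split_numbers
  rw [PySem.List.enumerate_eq_map_pyRange s.toList ' ', List.foldl_map]
  have hlen : PySem.Str.len s = PySem.List.len s.toList := by
    simp [PySem.Str.len_eq, PySem.List.len]
  rw [hlen]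
  apply congrArg
  apply PySem.List.foldl_congr_mem
  intro acc i hi
  obtain ⟨h0, hlt⟩ := (PySem.List.mem_pyRange_one).1 hi
  obtain ⟨k, rfl⟩ := Int.eq_ofNat_of_zero_le h0
  have hk : k < s.toList.length := by
    simp [PySem.List.len] at hlt; exact_mod_cast hlt
  simp [PySem.List.pyGetD_natCast, List.getD_eq_getElem?_getD, List.getElem?_eq_getElem hk]

-- B computed as pvZm over the digit positions
theorem pvB_eq (s : String) :
    string_split_numbers_alt s = pvZm s (pvDpos (PySem.List.enumerate s.toList 0)) := by
  simp only [string_split_numbers_alt, PySem.List.slice_from_one]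
  rfl

-- every digit position drawn from enumerate xs n is ≥ n
theorem pvDpos_ge (xs : List Char) (n : Int) :
    ∀ i ∈ pvDpos (PySem.List.enumerate xs n), n ≤ i := by
  intro i hi
  simp only [pvDpos, List.mem_map, List.mem_filter] at hi
  obtain ⟨p, ⟨hp, _⟩, rfl⟩ := hi
  obtain ⟨k, _, rfl⟩ := (PySem.List.mem_enumerate_iff _ _ _).1 hp
  omega

theorem pvDpos_cons (i : Int) (c : Char) (ps : List (Int × Char)) :
    pvDpos ((i, c) :: ps) =
      if PySem.Chars.isdigit c = true then i :: pvDpos ps else pvDpos ps := by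
  by_cases hd : PySem.Chars.isdigit c <;> simp [pvDpos, hd]

theorem pvDpos_length (xs : List Char) :
    ∀ (n : Int), (pvDpos (PySem.List.enumerate xs n)).length = xs.countP PySem.Chars.isdigit := by
  induction xs with
  | nil => intro n; simp [pvDpos]
  | cons c t ih =>
      intro n
      rw [PySem.List.enumerate_cons, pvDpos_cons]
      have ht := ih (n + 1)
      by_cases hd : PySem.Chars.isdigit c
      · rw [if_pos hd, List.countP_cons_of_pos hd]
        simp [ht]
      · rw [if_neg hd, List.countP_cons_of_neg (by simpa using hd)]
        exact ht

theorem string_split_numbers_spec_aux (s : String) :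
    ¬ D_string_split_numbers s → string_split_numbers s = string_split_numbers_alt s := by
  intro hnd
  rw [pvA_eq, pvB_eq]
  cases hcs : s.toList with
  | nil => simp [PySem.List.enumerate_nil, pvDpos, pvGp, pvZm]
  | cons c t =>
      unfold D_string_split_numbers at hnd
      rw [hcs] at hnd
      rw [PySem.List.enumerate_cons, pvDpos_cons]
      by_cases hd : PySem.Chars.isdigit c
      · -- first char is a digit; ¬D_ forces fewer than two digits in total
        rw [if_pos hd]
        have h2 : ¬ 2 ≤ List.countP PySem.Chars.isdigit (c :: t) :=
          fun h => hnd ⟨by simp [hd], h⟩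
        rw [List.countP_cons_of_pos hd] at h2
        have hlen : (pvDpos (PySem.List.enumerate t (0 + 1))).length = 0 := by
          rw [pvDpos_length]; omega
        rw [List.length_eq_zero_iff] at hlen
        rw [hlen]
        simp [pvGp, pvZm]
      · -- first char not a digit: every digit position is ≥ 1, A's guard always passes
        rw [if_neg hd]
        have hall : ∀ i ∈ pvDpos (PySem.List.enumerate t (0 + 1)), i ≠ 0 := by
          intro i hi
          have := pvDpos_ge t (0 + 1) i hi
          omega
        cases hrest : pvDpos (PySem.List.enumerate t (0 + 1)) with
        | nil => simp [pvGp, pvZm]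
        | cons i0 r =>
            rw [hrest] at hall
            have h0 : i0 ≠ 0 := hall i0 (by simp)
            simp only [pvGp, ne_eq, not_true_eq_false]
            exact pvGp_zm s r i0 h0 (fun j hj => hall j (by simp [hj]))

theorem pvGp_length_le (s : String) :
    ∀ (l : List Int) (left : Int), (pvGp s left l).length ≤ l.length := by
  intro l
  induction l with
  | nil => intro left; simp [pvGp]
  | cons i r ih =>
      intro left
      by_cases h : left ≠ 0 <;> simp [pvGp, h] <;> have := ih i <;> omega

-- ===== VERDICT (by name: the statement is the Claim_ definition above) =====
theorem string_split_numbers_spec : Claim_unchanged_string_split_numbers := by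
  intro s _ hnd
  exact string_split_numbers_spec_aux s hnd

theorem string_split_numbers_changed : Claim_changed_string_split_numbers := by
  unfold Claim_changed_string_split_numbers; decide

theorem string_split_numbers_tight : Claim_exact_string_split_numbers := by
  intro s _ hD heq
  obtain ⟨hhead, hcnt⟩ := hD
  rw [pvA_eq, pvB_eq] at heq
  cases hcs : s.toList with
  | nil => rw [hcs] at hhead; simp at hhead
  | cons c t =>
      rw [hcs] at hhead hcnt heq
      simp only [List.head?_cons, Option.any_some] at hhead
      rw [PySem.List.enumerate_cons, pvDpos_cons, if_pos hhead] at heq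
      rw [List.countP_cons_of_pos hhead] at hcnt
      have hlen := pvDpos_length t (0 + 1)
      -- the remaining digit positions are nonempty
      cases hrest : pvDpos (PySem.List.enumerate t (0 + 1)) with
      | nil => rw [hrest] at hlen; simp at hlen; omega
      | cons i1 r =>
          rw [hrest] at heq
          have hle := pvGp_length_le s r i1
          have := congrArg List.length heq
          simp [pvGp, pvZm, List.length_zip] at this
          omega
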